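-- pv_equiv track=rewrite | github.com/KevinTapol/codewars-python | codewars153.py | data_reverse
-- ===== SOURCE A (Python) =====
-- def data_reverse(input):
--     # declare an empty array to represent a 2d array of the input bytes_2D
--     bytes_2D = []
--     # iterate through the input stepping by 8
--     for i in range(0, len(input), 8):
--         # append array copies starting at the current index and stopping at the current index + 8 to capture the 8th element inclusively
--         bytes_2D.append(input[i:i+8])
--
--     # declare an empty array result
--     result = []
--     # iterate through the 2d array bytes_2D grabbing each 1d array in reversed order
--     for byte_1D in reversed(bytes_2D):
--         # iterate through each 1d array and append each element to result
--         for e in byte_1D: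
--             result.append(e)
--     # return result
--     return result
-- ===== SOURCE B (Python) =====
-- def data_reverse(input):
--     n = len(input)
--     if n <= 8:
--         return list(input)
--     c = (n + 7) // 8
--     m = 8 * (c // 2)
--     return data_reverse(input[m:]) + data_reverse(input[:m])
-- ===== Notes on version B (the rewrite author's own statement) =====
-- stated objective: alternative
-- what changed: Replaces A's two staged passes (build a 2-D chunk table, then nested reversed-flatten loops) by a divide-and-conquer recursion: split the list at a chunk boundary near the middle and return the reversed second half followed by the reversed first half, with lists of at most 8 elements returned as-is; no chunk table and no reversed() anywhere.
import Mathlib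
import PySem

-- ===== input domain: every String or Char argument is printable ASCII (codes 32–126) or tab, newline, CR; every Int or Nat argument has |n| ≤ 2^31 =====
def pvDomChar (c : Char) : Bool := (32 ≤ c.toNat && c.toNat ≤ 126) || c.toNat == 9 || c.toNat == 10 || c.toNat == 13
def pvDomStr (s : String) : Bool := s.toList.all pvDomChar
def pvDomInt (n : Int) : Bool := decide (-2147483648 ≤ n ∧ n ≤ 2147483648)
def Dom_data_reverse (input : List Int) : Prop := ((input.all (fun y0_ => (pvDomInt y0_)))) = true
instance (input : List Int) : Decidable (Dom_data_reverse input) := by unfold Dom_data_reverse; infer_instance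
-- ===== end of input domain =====

-- B replaces A's two staged passes (2-D chunk table, then nested reversed-flatten loops) by a
-- divide-and-conquer recursion: split at a chunk boundary near the middle and swap the halves
-- (objective: alternative; no chunk table, no reversal).

-- ===== PORT A =====
def data_reverse (input : List Int) : List Int :=
  -- bytes_2D = []; for i in range(0, len(input), 8): bytes_2D.append(input[i:i+8])
  let bytes2D : List (List Int) :=
    (PySem.List.pyRange 0 (input.length : Int) 8).foldl
      (fun acc i => acc ++ [PySem.List.slice input (some i) (some (i + 8))]) []
  -- result = []; for byte_1D in reversed(bytes_2D): for e in byte_1D: result.append(e)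
  bytes2D.reverse.foldl
    (fun res byte1D => byte1D.foldl (fun r e => r ++ [e]) res) []

-- ===== PORT B =====
-- n = len(input); if n <= 8: return list(input)
-- c = (n + 7) // 8; m = 8 * (c // 2)   (a chunk boundary near the middle)
-- return data_reverse(input[m:]) + data_reverse(input[:m])

-- bounds on the split point m, used for termination of the port
theorem pvM_bounds (n : Int) (h : 8 < n) :
    8 ≤ 8 * PySem.Int.floordiv (PySem.Int.floordiv (n + 7) 8) 2 ∧
      8 * PySem.Int.floordiv (PySem.Int.floordiv (n + 7) 8) 2 < n := by
  rw [PySem.Int.floordiv_eq_ediv_of_pos (by norm_num : (0:Int) < 2),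
      PySem.Int.floordiv_eq_ediv_of_pos (by norm_num : (0:Int) < 8)]
  omega

def data_reverse_alt (input : List Int) : List Int :=
  let n : Int := (input.length : Int)
  if h : n ≤ 8 then input
  else
    let c : Int := PySem.Int.floordiv (n + 7) 8
    let m : Int := 8 * PySem.Int.floordiv c 2
    data_reverse_alt (PySem.List.slice input (some m) none) ++
      data_reverse_alt (PySem.List.slice input none (some m))
termination_by input.length
decreasing_by
  · obtain ⟨h1, h2⟩ := pvM_bounds (input.length : Int) (by omega)
    rw [PySem.List.slice_from input (by omega)]
    simp
    omega
  · obtain ⟨h1, h2⟩ := pvM_bounds (input.length : Int) (by omega)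
    rw [PySem.List.slice_to input (by omega)]
    simp
    omega

-- ===== PRECONDITION & SPEC =====
def Spec_data_reverse (input : List Int) (out : List Int) : Prop := out = data_reverse_alt input
instance (input : List Int) (out : List Int) : Decidable (Spec_data_reverse input out) := by unfold Spec_data_reverse; infer_instance

-- ===== CLAIM (what is proved, stated in full; the proofs are below) =====
def Claim_equal_data_reverse : Prop := ∀ (input : List Int), Dom_data_reverse input → Spec_data_reverse input (data_reverse input)

-- ===== LEMMAS AND PROOFS =====

-- the common characterisation: the list of 8-chunks, front to back
def pvChunks (l : List Int) : List (List Int) :=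
  if l = [] then [] else l.take 8 :: pvChunks (l.drop 8)
termination_by l.length
decreasing_by
  have : l.length ≠ 0 := fun h0 => (by assumption : ¬ l = []) (List.eq_nil_of_length_eq_zero h0)
  simp
  omega

theorem pvChunks_nil : pvChunks [] = [] := by rw [pvChunks]; simp

theorem pvChunks_cons (l : List Int) (h : l ≠ []) :
    pvChunks l = l.take 8 :: pvChunks (l.drop 8) := by
  rw [pvChunks, if_neg h]

-- generic accumulator lemmas (A's three append-loops)
theorem foldl_append_singleton {α β : Type} (f : α → β) (l : List α) (init : List β) :
    l.foldl (fun acc x => acc ++ [f x]) init = init ++ l.map f := by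
  induction l generalizing init with
  | nil => simp
  | cons x xs ih => simp [List.foldl, ih]

theorem foldl_append_elems {α : Type} (l : List α) (init : List α) :
    l.foldl (fun r e => r ++ [e]) init = init ++ l := by
  induction l generalizing init with
  | nil => simp
  | cons x xs ih => simp [List.foldl, ih]

theorem foldl_flatten {α : Type} (ls : List (List α)) (init : List α) :
    ls.foldl (fun res b => b.foldl (fun r e => r ++ [e]) res) init = init ++ ls.flatten := by
  induction ls generalizing init with
  | nil => simp
  | cons b bs ih => rw [List.foldl_cons, foldl_append_elems, ih]; simp

-- pyRange with step 8: nil and cons forms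
theorem pyRange8_nil (a b : Int) (h : b ≤ a) : PySem.List.pyRange a b 8 = [] := by
  rw [PySem.List.pyRange_of_pos a b (by norm_num : (0:Int) < 8)]
  rw [if_neg (by omega)]
  simp

theorem pyRange8_cons (a b : Int) (h : a < b) :
    PySem.List.pyRange a b 8 = a :: PySem.List.pyRange (a + 8) b 8 := by
  rw [PySem.List.pyRange_of_pos a b (by norm_num : (0:Int) < 8),
      PySem.List.pyRange_of_pos (a + 8) b (by norm_num : (0:Int) < 8)]
  have hc : (if a < b then ((b - a + 8 - 1) / 8).toNat else 0)
      = (if a + 8 < b then ((b - (a + 8) + 8 - 1) / 8).toNat else 0) + 1 := by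
    split_ifs <;> omega
  rw [hc, List.range_succ_eq_map, List.map_cons, List.map_map]
  congr 1
  · push_cast; ring
  apply List.map_congr_left
  intro k _
  simp only [Function.comp]
  push_cast
  ring

-- A's chunk list equals pvChunks
theorem mapslice (l : List Int) :
    (PySem.List.pyRange 0 (l.length : Int) 8).map
        (fun i => PySem.List.slice l (some i) (some (i + 8))) = pvChunks l := by
  by_cases h : l = []
  · subst h
    rw [pvChunks_nil]
    simp only [List.length_nil, Nat.cast_zero, pyRange8_nil 0 0 le_rfl, List.map_nil]
  · have hn : 0 < l.length := List.length_pos_iff.mpr h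
    have hnI : (0:Int) < (l.length : Int) := by exact_mod_cast hn
    rw [pyRange8_cons 0 (l.length : Int) hnI, List.map_cons]
    rw [pvChunks_cons l h]
    have hhead : PySem.List.slice l (some 0) (some (0 + 8)) = l.take 8 := by
      norm_num
      rw [PySem.List.slice_to l (by norm_num : (0:Int) ≤ 8)]
      rfl
    rw [hhead]
    congr 1
    -- tail: shift by 8 onto l.drop 8, then the IH
    have ih := mapslice (l.drop 8)
    rw [← ih]
    rw [PySem.List.pyRange_of_pos (0 + 8) (l.length : Int) (by norm_num : (0:Int) < 8),
        PySem.List.pyRange_of_pos 0 ((l.drop 8).length : Int) (by norm_num : (0:Int) < 8)]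
    have hcount : (if 0 + 8 < (l.length : Int) then (((l.length : Int) - (0 + 8) + 8 - 1) / 8).toNat else 0)
        = (if (0:Int) < ((l.drop 8).length : Int) then ((((l.drop 8).length : Int) - 0 + 8 - 1) / 8).toNat else 0) := by
      have hd : (l.drop 8).length = l.length - 8 := by simp
      split_ifs <;> omega
    rw [hcount, List.map_map, List.map_map]
    apply List.map_congr_left
    intro k _
    simp only [Function.comp]
    have e1 : (0:Int) + 8 + 8 * (k:Int) = ((8 + 8 * k : Nat) : Int) := by push_cast; ring
    have e2 : (0:Int) + 8 + 8 * (k:Int) + 8 = ((8 + 8 * k : Nat) : Int) + ((8:Nat) : Int) := by push_cast; ring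
    have e3 : (0:Int) + 8 * (k:Int) = ((8 * k : Nat) : Int) := by push_cast; ring
    have e4 : (0:Int) + 8 * (k:Int) + 8 = ((8 * k : Nat) : Int) + ((8:Nat) : Int) := by push_cast; ring
    rw [e2, e1, e4, e3, PySem.List.slice_natCast_add, PySem.List.slice_natCast_add]
    rw [List.drop_drop]
termination_by l.length
decreasing_by
  have : l.length ≠ 0 := fun h0 => h (List.eq_nil_of_length_eq_zero h0)
  simp
  omega

-- splitting the chunk list at any chunk boundary 8*k
theorem chunks_split (k : Nat) (l : List Int) :
    pvChunks l = pvChunks (l.take (8 * k)) ++ pvChunks (l.drop (8 * k)) := by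
  induction k generalizing l with
  | zero =>
    simp only [Nat.mul_zero, List.take_zero, List.drop_zero, pvChunks_nil, List.nil_append]
  | succ k ih =>
    by_cases h : l = []
    · subst h; simp [pvChunks]
    · have ht : l.take (8 * (k + 1)) ≠ [] := by
        simp [List.take_eq_nil_iff]
        intro hc
        exact absurd hc h
      rw [pvChunks_cons l h, pvChunks_cons _ ht]
      have h1 : (l.take (8 * (k + 1))).take 8 = l.take 8 := by
        rw [List.take_take, show min 8 (8 * (k + 1)) = 8 from by omega]
      have h2 : (l.take (8 * (k + 1))).drop 8 = (l.drop 8).take (8 * k) := by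
        rw [List.drop_take, show 8 * (k + 1) - 8 = 8 * k from by omega]
      have h3 : l.drop (8 * (k + 1)) = (l.drop 8).drop (8 * k) := by
        rw [List.drop_drop, show 8 * (k + 1) = 8 + 8 * k from by omega]
      rw [h1, h2, h3, List.cons_append]
      congr 1
      exact ih (l.drop 8)

-- B equals the reversed-flattened chunk list
theorem alt_eq (l : List Int) : data_reverse_alt l = (pvChunks l).reverse.flatten := by
  rw [data_reverse_alt]
  by_cases h : (l.length : Int) ≤ 8
  · rw [dif_pos h]
    by_cases hnil : l = []
    · subst hnil; rw [pvChunks_nil]; simp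
    · rw [pvChunks_cons l hnil]
      have hd : l.drop 8 = [] := by
        apply List.drop_eq_nil_of_le
        omega
      rw [hd, pvChunks_nil]
      simp
      omega
  · rw [dif_neg h]
    dsimp only
    obtain ⟨h1, h2⟩ := pvM_bounds (l.length : Int) (by omega)
    rw [PySem.List.slice_from l (by omega), PySem.List.slice_to l (by omega)]
    rw [alt_eq (l.drop (8 * PySem.Int.floordiv (PySem.Int.floordiv ((l.length : Int) + 7) 8) 2).toNat),
        alt_eq (l.take (8 * PySem.Int.floordiv (PySem.Int.floordiv ((l.length : Int) + 7) 8) 2).toNat)]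
    have hm : (8 * PySem.Int.floordiv (PySem.Int.floordiv ((l.length : Int) + 7) 8) 2).toNat
        = 8 * (PySem.Int.floordiv (PySem.Int.floordiv ((l.length : Int) + 7) 8) 2).toNat := by
      omega
    rw [hm, chunks_split (PySem.Int.floordiv (PySem.Int.floordiv ((l.length : Int) + 7) 8) 2).toNat l]
    rw [List.reverse_append, List.flatten_append]
termination_by l.length
decreasing_by
  · obtain ⟨h1, h2⟩ := pvM_bounds (l.length : Int) (by omega)
    simp
    omega
  · obtain ⟨h1, h2⟩ := pvM_bounds (l.length : Int) (by omega)
    simp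
    omega

-- ===== VERDICT (by name: the statement is the Claim_ definition above) =====
theorem data_reverse_spec : Claim_equal_data_reverse := by
  intro input _
  unfold Spec_data_reverse data_reverse
  rw [foldl_append_singleton, foldl_flatten]
  simp only [List.nil_append]
  rw [mapslice, alt_eq]
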